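-- pv_equiv track=rewrite | github.com/AntoineBesson/Second_brain | backend/ingestion/youtube.py | _join_transcript
-- ===== SOURCE A (Python) =====
-- def _join_transcript(segments: list[dict]) -> str:
--     """Join transcript segments into sentences.
--
--     Segments not ending with .?! are joined with spaces.
--     A newline is inserted between complete sentences.
--     """
--     lines: list[str] = []
--     current: list[str] = []
--
--     for seg in segments:
--         text = seg["text"].strip()
--         if not text:
--             continue
--         current.append(text)
--         if text[-1] in ".?!":
--             lines.append(" ".join(current))
--             current = []
--
--     if current:
--         lines.append(" ".join(current))
--
--     return "\n".join(lines)
-- ===== SOURCE B (Python) =====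
-- def _join_transcript(segments: list[dict]) -> str:
--     """Join transcript segments into sentences (flat separator encoding).
--
--     Each non-empty stripped text is emitted once, followed by its separator:
--     a newline if it completes a sentence (ends with .?!), else a space.
--     Concatenating and dropping the final separator yields the joined text.
--     """
--     parts: list[str] = []
--     for seg in segments:
--         text = seg["text"].strip()
--         if not text:
--             continue
--         parts.append(text + ("\n" if text[-1] in ".?!" else " "))
--     return "".join(parts)[:-1]
-- ===== Notes on version B (the rewrite author's own statement) =====
-- stated objective: simpler
-- what changed: Replaces the two-list group buffer (lines + current, flushed on sentence ends) with a single flat list of text-plus-separator chunks, concatenated once and trimmed of the final separator.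
import Mathlib
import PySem

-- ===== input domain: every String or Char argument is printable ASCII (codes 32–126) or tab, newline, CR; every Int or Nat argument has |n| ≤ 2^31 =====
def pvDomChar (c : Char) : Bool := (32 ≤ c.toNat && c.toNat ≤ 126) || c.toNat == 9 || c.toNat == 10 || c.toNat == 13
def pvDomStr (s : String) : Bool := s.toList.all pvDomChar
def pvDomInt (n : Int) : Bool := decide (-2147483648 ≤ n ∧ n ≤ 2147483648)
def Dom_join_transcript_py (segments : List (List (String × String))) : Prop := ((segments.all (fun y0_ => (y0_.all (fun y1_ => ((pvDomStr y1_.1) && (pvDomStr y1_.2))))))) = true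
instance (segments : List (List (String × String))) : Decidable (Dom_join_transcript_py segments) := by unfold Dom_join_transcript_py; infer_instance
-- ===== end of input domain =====

-- B replaces A's two-list group buffer with one flat list of text-plus-separator
-- chunks, concatenated once and trimmed of the final separator (objective: simpler).

-- ===== PORT A =====
-- One loop step of A: state is (lines, current).
def pvStepA (st : List String × List String) (seg : List (String × String)) :
    List String × List String :=
  match PySem.Dict.get? (PySem.Dict.mk seg) "text" with
  | none => st  -- seg["text"] raises KeyError in Python; excluded by Pre_
  | some raw =>
    let text := PySem.Str.strip raw
    if text = "" then st
    else
      let current := st.2 ++ [text]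
      match PySem.Str.pyGet? text (-1) with
      | some c =>
        if c ∈ (".?!".toList) then (st.1 ++ [PySem.Str.join " " current], [])
        else (st.1, current)
      | none => (st.1, current)  -- unreachable: text is non-empty here

def join_transcript_py (segments : List (List (String × String))) : String :=
  let st := segments.foldl pvStepA ([], [])
  let lines := if st.2 = [] then st.1 else st.1 ++ [PySem.Str.join " " st.2]
  PySem.Str.join "\n" lines

-- ===== PORT B =====
-- One loop step of B: state is the flat parts list.
def pvStepB (parts : List String) (seg : List (String × String)) : List String :=
  match PySem.Dict.get? (PySem.Dict.mk seg) "text" with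
  | none => parts  -- seg["text"] raises KeyError in Python; excluded by Pre_
  | some raw =>
    let text := PySem.Str.strip raw
    if text = "" then parts
    else
      let sep := match PySem.Str.pyGet? text (-1) with
        | some c => if c ∈ (".?!".toList) then "\n" else " "
        | none => " "  -- unreachable: text is non-empty here
      parts ++ [text ++ sep]

def join_transcript_py_alt (segments : List (List (String × String))) : String :=
  let parts := segments.foldl pvStepB []
  PySem.Str.slice (PySem.Str.join "" parts) none (some (-1))

-- ===== PRECONDITION & SPEC =====
-- Pre_ excludes segments missing the "text" key, on which Python's seg["text"] raises KeyError.
def Pre_join_transcript_py (segments : List (List (String × String))) : Prop :=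
  ∀ seg ∈ segments, (PySem.Dict.get? (PySem.Dict.mk seg) "text").isSome = true
instance (segments : List (List (String × String))) : Decidable (Pre_join_transcript_py segments) := by
  unfold Pre_join_transcript_py; infer_instance
def pvWitness_join_transcript_py : (List (List (String × String))) :=
  [[("text", "Hello world."), ("start", "0")], [("text", "and then")]]
def Spec_join_transcript_py (segments : List (List (String × String))) (out : String) : Prop := out = join_transcript_py_alt segments
instance (segments : List (List (String × String))) (out : String) : Decidable (Spec_join_transcript_py segments out) := by unfold Spec_join_transcript_py; infer_instance

-- ===== CLAIM (what is proved, stated in full; the proofs are below) =====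
def Claim_equal_join_transcript_py : Prop := ∀ (segments : List (List (String × String))), Dom_join_transcript_py segments → Pre_join_transcript_py segments → Spec_join_transcript_py segments (join_transcript_py segments)

-- ===== LEMMAS AND PROOFS =====

-- chunks of xs, each followed by the one-char separator c, concatenated
def pvF (c : Char) (xs : List String) : List Char :=
  (xs.map (fun s => s.toList ++ [c])).flatten

-- the char content of B's parts list expressed from A's state
def pvBlob (lines current : List String) : List Char :=
  pvF '\n' lines ++ pvF ' ' current

def pvFlat (parts : List String) : List Char := (parts.map String.toList).flatten

theorem pvIntercalate_nil (xs : List (List Char)) : List.intercalate [] xs = xs.flatten := by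
  induction xs with
  | nil => rfl
  | cons x xs ih => cases xs <;> simp_all [List.intercalate]

theorem pvIntercalate_snoc (sep z : List Char) (ys : List (List Char)) :
    List.intercalate sep (ys ++ [z]) = (ys.map (· ++ sep)).flatten ++ z := by
  induction ys with
  | nil => simp [List.intercalate]
  | cons y ys ih =>
    cases ys with
    | nil => simp [List.intercalate, List.intersperse]
    | cons y' ys' =>
      have h : List.intercalate sep (y :: ((y' :: ys') ++ [z]))
          = y ++ sep ++ List.intercalate sep ((y' :: ys') ++ [z]) := by
        simp [List.intercalate, List.intersperse]
      simp only [List.cons_append] at h ih ⊢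
      rw [h, ih]; simp

theorem pvSlice_neg_one (xs : List Char) :
    PySem.Chars.slice xs none (some (-1)) = xs.dropLast := by
  unfold PySem.Chars.slice PySem.List.slice PySem.List.clampIdx
  rw [List.dropLast_eq_take]
  cases xs with
  | nil => rfl
  | cons x t =>
    have h2 : ¬ (((t.length + 1 : Nat) : Int) + (-1) < 0) := by omega
    simp only [List.length_cons, show ((-1:Int) < 0) from by norm_num, if_true, h2, if_false,
      List.drop_zero]
    congr 1
    omega

-- join with a one-char separator, last group pending: the snoc form of pvF
theorem pvF_snoc (c : Char) (xs : List String) (t : String) :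
    pvF c (xs ++ [t]) = pvF c xs ++ t.toList ++ [c] := by
  simp [pvF]

theorem pvJoin_toList (sep : String) (xs : List String) :
    (PySem.Str.join sep xs).toList = List.intercalate sep.toList (xs.map String.toList) := by
  rw [PySem.Str.toList_join]; rfl

-- invariant: pvFlat of B's state equals pvBlob of A's state, preserved by the loops
theorem pvInv (segments : List (List (String × String))) :
    ∀ lines current parts, pvFlat parts = pvBlob lines current →
      pvFlat (segments.foldl pvStepB parts)
        = pvBlob (segments.foldl pvStepA (lines, current)).1
                 (segments.foldl pvStepA (lines, current)).2 := by
  induction segments with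
  | nil => intro lines current parts h; simpa using h
  | cons seg segs ih =>
    intro lines current parts h
    simp only [List.foldl_cons]
    have hflat : ∀ (s : String), pvFlat (parts ++ [s]) = pvFlat parts ++ s.toList := by
      intro s; simp [pvFlat]
    cases hg : PySem.Dict.get? (PySem.Dict.mk seg) "text" with
    | none =>
      rw [show pvStepA (lines, current) seg = (lines, current) from by simp [pvStepA, hg],
        show pvStepB parts seg = parts from by simp [pvStepB, hg]]
      exact ih lines current parts h
    | some raw =>
      by_cases he : PySem.Str.strip raw = ""
      · rw [show pvStepA (lines, current) seg = (lines, current) from by simp [pvStepA, hg, he],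
          show pvStepB parts seg = parts from by simp [pvStepB, hg, he]]
        exact ih lines current parts h
      · cases hc : PySem.List.pyGet? (PySem.Chars.strip raw.toList) (-1) with
        | none =>
          rw [show pvStepA (lines, current) seg = (lines, current ++ [PySem.Str.strip raw]) from by
                simp [pvStepA, PySem.Str.pyGet?_eq, PySem.Str.toList_strip, hg, he, hc],
            show pvStepB parts seg = parts ++ [PySem.Str.strip raw ++ " "] from by
                simp [pvStepB, PySem.Str.pyGet?_eq, PySem.Str.toList_strip, hg, he, hc]]
          apply ih
          rw [hflat, h, String.toList_append]
          simp [pvBlob, pvF_snoc]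
        | some c =>
          by_cases hm : c = '.' ∨ c = '?' ∨ c = '!'
          · have hJ : (PySem.Str.join " " (current ++ [PySem.Str.strip raw])).toList
                = pvF ' ' current ++ (PySem.Str.strip raw).toList := by
              rw [pvJoin_toList,
                show ((current ++ [PySem.Str.strip raw]).map String.toList)
                  = current.map String.toList ++ [(PySem.Str.strip raw).toList] from by simp,
                pvIntercalate_snoc, show (" " : String).toList = [' '] from by decide]
              simp [pvF, List.map_map, Function.comp_def]
            rw [show pvStepA (lines, current) seg
                  = (lines ++ [PySem.Str.join " " (current ++ [PySem.Str.strip raw])], []) from by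
                simp [pvStepA, PySem.Str.pyGet?_eq, PySem.Str.toList_strip, hg, he, hc, hm],
              show pvStepB parts seg = parts ++ [PySem.Str.strip raw ++ "\n"] from by
                simp [pvStepB, PySem.Str.pyGet?_eq, PySem.Str.toList_strip, hg, he, hc, hm]]
            apply ih
            rw [hflat, h, String.toList_append,
              show ("\n" : String).toList = ['\n'] from by decide,
              show pvBlob (lines ++ [PySem.Str.join " " (current ++ [PySem.Str.strip raw])]) []
                = pvF '\n' lines
                  ++ ((PySem.Str.join " " (current ++ [PySem.Str.strip raw])).toList ++ ['\n'])
                from by simp [pvBlob, pvF],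
              hJ]
            simp [pvBlob]
          · rw [show pvStepA (lines, current) seg = (lines, current ++ [PySem.Str.strip raw]) from by
                simp [pvStepA, PySem.Str.pyGet?_eq, PySem.Str.toList_strip, hg, he, hc, hm],
              show pvStepB parts seg = parts ++ [PySem.Str.strip raw ++ " "] from by
                simp [pvStepB, PySem.Str.pyGet?_eq, PySem.Str.toList_strip, hg, he, hc, hm]]
            apply ih
            rw [hflat, h, String.toList_append]
            simp [pvBlob, pvF_snoc]

-- final step: A's join over the flushed lines is B's blob minus its last char
theorem pvFinal (lines current : List String) :
    (PySem.Str.join "\n" (if current = [] then lines else lines ++ [PySem.Str.join " " current])).toList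
      = (pvBlob lines current).dropLast := by
  have hnl : ("\n" : String).toList = ['\n'] := by decide
  have hsp : (" " : String).toList = [' '] := by decide
  by_cases hcur : current = []
  · subst hcur
    rw [if_pos rfl]
    simp only [pvBlob, pvF, List.map_nil, List.flatten_nil, List.append_nil]
    rcases List.eq_nil_or_concat lines with h | ⟨ys, z, h⟩
    · subst h; simp
    · simp only [List.concat_eq_append] at h
      subst h
      rw [pvJoin_toList, hnl]
      rw [show ((ys ++ [z]).map String.toList) = ys.map String.toList ++ [z.toList] from by simp,
        pvIntercalate_snoc]
      rw [show (ys ++ [z]).map (fun s => s.toList ++ ['\n'])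
          = ys.map (fun s => s.toList ++ ['\n']) ++ [z.toList ++ ['\n']] from by simp]
      rw [List.flatten_append]
      simp only [List.flatten_cons, List.flatten_nil, List.append_nil]
      rw [show (ys.map (fun s => s.toList ++ ['\n'])).flatten ++ (z.toList ++ ['\n'])
          = ((ys.map (fun s => s.toList ++ ['\n'])).flatten ++ z.toList) ++ ['\n'] from by simp,
        List.dropLast_concat]
      simp [List.map_map, Function.comp_def]
  · rcases List.eq_nil_or_concat current with h | ⟨ys, z, h⟩
    · exact absurd h hcur
    simp only [List.concat_eq_append] at h
    subst h
    simp only [if_neg hcur]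
    rw [pvJoin_toList, hnl]
    rw [show ((lines ++ [PySem.Str.join " " (ys ++ [z])]).map String.toList)
        = lines.map String.toList ++ [(PySem.Str.join " " (ys ++ [z])).toList] from by simp,
      pvIntercalate_snoc]
    rw [pvJoin_toList, hsp]
    rw [show ((ys ++ [z]).map String.toList) = ys.map String.toList ++ [z.toList] from by simp,
      pvIntercalate_snoc]
    rw [show pvBlob lines (ys ++ [z])
        = (pvF '\n' lines ++ ((ys.map String.toList).map (· ++ [' '])).flatten ++ z.toList) ++ [' ']
        from by simp [pvBlob, pvF, List.map_map, Function.comp_def],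
      List.dropLast_concat]
    simp [pvF, List.map_map, Function.comp_def]

-- ===== VERDICT (by name: the statement is the Claim_ definition above) =====
theorem join_transcript_py_spec : Claim_equal_join_transcript_py := by
  intro segments _ _
  unfold Spec_join_transcript_py
  simp only [join_transcript_py, join_transcript_py_alt]
  apply String.toList_inj.mp
  rw [PySem.Str.toList_slice, pvSlice_neg_one, pvFinal]
  congr 1
  rw [pvJoin_toList, show ("" : String).toList = ([] : List Char) from by decide,
    pvIntercalate_nil]
  exact (pvInv segments [] [] [] (by simp [pvFlat, pvBlob, pvF])).symm
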